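-- pv_equiv track=rewrite | github.com/noeticanlabs/cbtsv1 | receipts_condenser.py | analyze_stability
-- ===== SOURCE A (Python) =====
-- def analyze_stability(data):
--     if not data:
--         return "No data"
--     values = [entry[1] for entry in data]
--     min_val = min(values)
--     max_val = max(values)
--     if min_val == max_val:
--         return f"Stable at {min_val}"
--     else:
--         return f"Ranges from {min_val} to {max_val}"
-- ===== SOURCE B (Python) =====
-- def analyze_stability(data):
--     if not data:
--         return "No data"
--     vs = sorted(entry[1] for entry in data)
--     lo, hi = vs[0], vs[-1]
--     if lo == hi:
--         return f"Stable at {lo}"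
--     return f"Ranges from {lo} to {hi}"
-- ===== Notes on version B (the rewrite author's own statement) =====
-- stated objective: alternative
-- what changed: Replaces the min()/max() reduction passes by sorting the values once and reading the extremes off the ends of the sorted list (vs[0] and vs[-1]).
import Mathlib
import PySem

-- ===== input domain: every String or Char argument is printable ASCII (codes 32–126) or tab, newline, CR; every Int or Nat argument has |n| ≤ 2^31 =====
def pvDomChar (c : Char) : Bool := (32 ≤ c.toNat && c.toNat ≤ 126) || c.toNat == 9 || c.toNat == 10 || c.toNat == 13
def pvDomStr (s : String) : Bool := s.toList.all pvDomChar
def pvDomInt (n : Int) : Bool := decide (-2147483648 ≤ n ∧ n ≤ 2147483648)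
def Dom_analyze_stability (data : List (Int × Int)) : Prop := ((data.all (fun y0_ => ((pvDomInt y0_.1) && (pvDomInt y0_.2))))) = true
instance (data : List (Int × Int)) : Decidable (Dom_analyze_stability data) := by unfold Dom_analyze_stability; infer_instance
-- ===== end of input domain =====

-- ===== PORT A =====
-- B sorts the values once and reads the extremes off the ends of the sorted list instead of the min()/max() reductions (objective: alternative).
def analyze_stability (data : List (Int × Int)) : String :=
  if data = [] then "No data"
  else
    let values := data.map (fun entry => entry.2)
    match PySem.List.min? values (fun x => x), PySem.List.max? values (fun x => x) with
    | some min_val, some max_val =>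
      if min_val = max_val then "Stable at " ++ PySem.Int.toStr min_val
      else "Ranges from " ++ PySem.Int.toStr min_val ++ " to " ++ PySem.Int.toStr max_val
    | _, _ => ""  -- unreachable: min?/max? of a nonempty list are some

-- ===== PORT B =====
def analyze_stability_alt (data : List (Int × Int)) : String :=
  if data = [] then "No data"
  else
    let vs := PySem.List.sorted (data.map (fun entry => entry.2)) (fun x => x) false
    match PySem.List.pyGet? vs 0 with
    | none => ""  -- unreachable: vs is nonempty
    | some lo =>
      match PySem.List.pyGet? vs (-1) with
      | none => ""  -- unreachable
      | some hi =>
        if lo = hi then "Stable at " ++ PySem.Int.toStr lo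
        else "Ranges from " ++ PySem.Int.toStr lo ++ " to " ++ PySem.Int.toStr hi

-- ===== PRECONDITION & SPEC =====
def Spec_analyze_stability (data : List (Int × Int)) (out : String) : Prop := out = analyze_stability_alt data
instance (data : List (Int × Int)) (out : String) : Decidable (Spec_analyze_stability data out) := by unfold Spec_analyze_stability; infer_instance

-- ===== CLAIM (what is proved, stated in full; the proofs are below) =====
def Claim_equal_analyze_stability : Prop := ∀ (data : List (Int × Int)), Dom_analyze_stability data → Spec_analyze_stability data (analyze_stability data)

-- ===== LEMMAS AND PROOFS =====

-- in a (≤)-pairwise list, every element is ≤ the last one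
theorem le_getLast_of_pairwise (l : List Int) (hp : l.Pairwise (· ≤ ·)) :
    ∀ y ∈ l, ∀ h : l ≠ [], y ≤ l.getLast h := by
  induction l with
  | nil => intro y hy; simp at hy
  | cons a t ih =>
    intro y hy h
    rcases List.pairwise_cons.mp hp with ⟨ha, ht⟩
    cases t with
    | nil => simp at hy; simp [hy, List.getLast]
    | cons b s =>
      rw [List.getLast_cons (by simp)]
      rcases List.mem_cons.mp hy with rfl | hyt
      · exact le_trans (ha b (by simp)) (ih ht b (by simp) (by simp))
      · exact ih ht y hyt (by simp)

theorem sorted_head_last (l : List Int) (h : l ≠ []) :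
    ∃ m s, PySem.List.sorted l (fun x => x) false = m :: s ∧
      (∀ y ∈ l, m ≤ y) ∧ m ∈ l ∧
      (∀ hn : (m :: s : List Int) ≠ [], ((m :: s).getLast hn ∈ l ∧ ∀ y ∈ l, y ≤ (m :: s).getLast hn)) := by
  cases hs : PySem.List.sorted l (fun x => x) false with
  | nil => exact absurd ((PySem.List.sorted_eq_nil_iff _ _ _).mp hs) h
  | cons m s =>
    have hperm : (m :: s).Perm l := hs ▸ PySem.List.sorted_perm l (fun x => x) false
    have hmem : ∀ y, y ∈ m :: s ↔ y ∈ l := fun y => hperm.mem_iff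
    have hpw : (m :: s).Pairwise (· ≤ ·) := by
      have := PySem.List.sorted_pairwise l (fun x => x)
      rwa [hs] at this
    refine ⟨m, s, rfl, ?_, (hmem m).mp (by simp), fun hn => ⟨?_, ?_⟩⟩
    · intro y hy; exact PySem.List.key_head_sorted_le l (fun x => x) hs y hy
    · exact (hmem _).mp (List.getLast_mem hn)
    · intro y hy
      exact le_getLast_of_pairwise _ hpw y ((hmem y).mpr hy) hn

theorem min_max_agree (l : List Int) (x : Int) (t : List Int) (hl : l = x :: t) :
    ∀ m s, PySem.List.sorted l (fun x => x) false = m :: s →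
      m = t.foldl min x ∧ (m :: s).getLast (by simp) = t.foldl max x := by
  intro m s hs
  obtain ⟨m', s', hs', hmin, hmmem, hlast⟩ := sorted_head_last l (by simp [hl])
  rw [hs] at hs'
  obtain ⟨rfl, rfl⟩ : m = m' ∧ s = s' := by
    have := hs'.symm
    simp only [List.cons.injEq] at this
    exact ⟨this.1.symm, this.2.symm⟩
  obtain ⟨hlmem, hlmax⟩ := hlast (by simp)
  -- A's min: via min?_id_cons
  have hminA : PySem.List.min? l (fun y => y) = some (t.foldl min x) := by
    rw [hl]; exact PySem.List.min?_id_cons _ _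
  have hmaxA : PySem.List.max? l (fun y => y) = some (t.foldl max x) := by
    rw [hl]; exact PySem.List.max?_id_cons _ _
  have hAmem := PySem.List.min?_mem hminA
  have hAmin := PySem.List.min?_isMin hminA
  have hBmem := PySem.List.max?_mem hmaxA
  have hBmax := PySem.List.max?_isMax hmaxA
  constructor
  · exact le_antisymm (hmin _ hAmem) (hAmin m hmmem)
  · exact le_antisymm (hBmax _ hlmem) (hlmax _ hBmem)

-- ===== VERDICT (by name: the statement is the Claim_ definition above) =====
theorem analyze_stability_spec : Claim_equal_analyze_stability := by
  intro data _
  unfold Spec_analyze_stability analyze_stability analyze_stability_alt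
  cases data with
  | nil => rfl
  | cons h t =>
    simp only [if_neg (List.cons_ne_nil h t)]
    set l := (h :: t).map (fun entry => entry.2) with hl
    have hlc : l = h.2 :: t.map (fun e => e.2) := by simp [hl]
    cases hs : PySem.List.sorted l (fun x => x) false with
    | nil => exact absurd ((PySem.List.sorted_eq_nil_iff _ _ _).mp hs) (by simp [hlc])
    | cons m s =>
      obtain ⟨hm, hlastv⟩ := min_max_agree l h.2 (t.map (fun e => e.2)) hlc m s hs
      have hminA : PySem.List.min? l (fun y => y) = some ((t.map (fun e => e.2)).foldl min h.2) := by
        rw [hlc]; exact PySem.List.min?_id_cons _ _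
      have hmaxA : PySem.List.max? l (fun y => y) = some ((t.map (fun e => e.2)).foldl max h.2) := by
        rw [hlc]; exact PySem.List.max?_id_cons _ _
      rw [hminA, hmaxA, PySem.List.pyGet?_zero_cons, PySem.List.pyGet?_neg_one]
      rw [List.getLast?_eq_some_getLast (by simp), ← hm, ← hlastv]
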